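-- pv_equiv track=rewrite | github.com/jmdall/lirecouleur | tests/lirecouleur.py | generer_masque_paragraphe_phonemes
-- ===== SOURCE A (Python) =====
-- def generer_masque_phonemes(phonemes, l_phon):
-- 	mask = []
-- 	if type(phonemes) == type(list):
-- 		return mask
--
-- 	i = 0
-- 	nb_phon = len(phonemes)
-- 	nb_l_phon = len(l_phon)
-- 	while i < nb_phon:
-- 		phon = phonemes[i][0].split('_')[0]
-- 		if phon == l_phon[0]:
-- 			j = 1
-- 			k = i+1
-- 			trouve = True
-- 			while (k < nb_phon) and trouve and (j < nb_l_phon):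
-- 				phon = phonemes[k][0].split('_')[0]
-- 				trouve = (phon == l_phon[j])
-- 				j += 1
-- 				k += 1
-- 			if trouve and (j == nb_l_phon):
-- 				# on est arrivé à la fin du pattern
-- 				mask.extend([1 for u in range(nb_l_phon)])
-- 				i += nb_l_phon
-- 			else:
-- 				# on n'a pas trouvé le pattern complet
-- 				mask.append(0)
-- 				i += 1
-- 		else:
-- 			mask.append(0)
-- 			i += 1
-- 	return mask
--
-- def generer_masque_paragraphe_phonemes(pp, l_phon):
-- 	pm = []
-- 	for umot in pp:
-- 		if isinstance(umot, list):
-- 			pm.append(generer_masque_phonemes(umot, l_phon))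
-- 		else:
-- 			pm.append([])
-- 	return pm
-- ===== SOURCE B (Python) =====
-- def _occurrences(toks, pat):
--     # all start positions where pat matches in toks
--     return [s for s in range(len(toks) - len(pat) + 1) if toks[s:s + len(pat)] == pat]
--
-- def _masque(phonemes, l_phon):
--     # stage 1: tokenize once; stage 2: list all match positions; stage 3: greedy
--     # left-to-right selection of non-overlapping occurrences; stage 4: paint the
--     # selected intervals with 1s into a zero-filled mask
--     toks = [p[0].split('_')[0] for p in phonemes]
--     L = len(l_phon)
--     mask = [0] * len(toks)
--     if L == 0:
--         return mask
--     end = 0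
--     for s in _occurrences(toks, l_phon):
--         if s >= end:
--             mask[s:s + L] = [1] * L
--             end = s + L
--     return mask
--
-- def generer_masque_paragraphe_phonemes(pp, l_phon):
--     return [_masque(umot, l_phon) if isinstance(umot, list) else [] for umot in pp]
-- ===== Notes on version B (the rewrite author's own statement) =====
-- stated objective: alternative
-- what changed: B replaces A's single interleaved scan (nested while loops building the mask element by element and jumping on a match) by four staged passes: tokenize each word once, enumerate ALL pattern occurrence positions as a list, greedily select non-overlapping occurrences from that list, and finally paint the selected intervals with 1s into a pre-built zero mask via slice assignment.
import Mathlib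
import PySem

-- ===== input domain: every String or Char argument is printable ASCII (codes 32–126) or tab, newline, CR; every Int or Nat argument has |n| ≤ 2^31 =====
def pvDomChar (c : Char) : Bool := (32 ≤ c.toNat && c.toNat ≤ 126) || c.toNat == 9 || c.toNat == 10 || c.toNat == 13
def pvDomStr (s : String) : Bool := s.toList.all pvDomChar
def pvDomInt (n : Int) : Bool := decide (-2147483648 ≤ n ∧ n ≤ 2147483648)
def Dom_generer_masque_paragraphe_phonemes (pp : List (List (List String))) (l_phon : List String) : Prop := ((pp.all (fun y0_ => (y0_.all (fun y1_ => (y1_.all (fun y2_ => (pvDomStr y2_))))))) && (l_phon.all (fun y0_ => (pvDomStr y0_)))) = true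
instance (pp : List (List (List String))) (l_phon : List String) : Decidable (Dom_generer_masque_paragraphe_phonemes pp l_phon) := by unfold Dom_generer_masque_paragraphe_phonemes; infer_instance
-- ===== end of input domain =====

-- B replaces A's single interleaved scan by staged passes: tokenize once, list all
-- occurrence positions, greedily select non-overlapping ones, paint the intervals
-- with 1s into a zero-filled mask (objective: alternative decomposition, same cost).

-- ===== PORT A =====
-- phonemes[i][0].split('_')[0]  (shared shape of both Pythons' token computation)
def pvTok (e : List String) : String :=
  ((PySem.Str.split? (PySem.List.pyGetD e 0 "") "_").getD []).headD ""

-- A's inner `while (k < nb_phon) and trouve and (j < nb_l_phon)` loop; returns (trouve, j).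
-- The Nat fuel is only a totality guard (the entry call passes enough for the loop to finish).
def pvInnerA (phonemes : List (List String)) (l_phon : List String) : Nat → Nat → Nat → Bool → Bool × Nat
  | fuel+1, j, k, trouve =>
    if k < phonemes.length ∧ trouve = true ∧ j < l_phon.length then
      pvInnerA phonemes l_phon fuel (j+1) (k+1)
        (pvTok (PySem.List.pyGetD phonemes (k : Int) []) == PySem.List.pyGetD l_phon (j : Int) "")
    else (trouve, j)
  | 0, j, _, trouve => (trouve, j)

-- A's outer `while i < nb_phon` loop (fuel: totality guard, i grows by ≥ 1 per iteration)
def pvOuterA (phonemes : List (List String)) (l_phon : List String) : Nat → Nat → List Int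
  | fuel+1, i =>
    if i < phonemes.length then
      if pvTok (PySem.List.pyGetD phonemes (i : Int) []) == PySem.List.pyGetD l_phon (0 : Int) "" then
        if (pvInnerA phonemes l_phon l_phon.length 1 (i+1) true).1 = true ∧
            (pvInnerA phonemes l_phon l_phon.length 1 (i+1) true).2 = l_phon.length then
          List.replicate l_phon.length (1 : Int) ++ pvOuterA phonemes l_phon fuel (i + l_phon.length)
        else
          (0 : Int) :: pvOuterA phonemes l_phon fuel (i+1)
      else
        (0 : Int) :: pvOuterA phonemes l_phon fuel (i+1)
    else []
  | 0, _ => []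

def generer_masque_phonemes_A (phonemes : List (List String)) (l_phon : List String) : List Int :=
  -- Python's `if type(phonemes) == type(list)` compares with `type` and is always False: dead branch
  pvOuterA phonemes l_phon phonemes.length 0

def generer_masque_paragraphe_phonemes (pp : List (List (List String))) (l_phon : List String) : List (List Int) :=
  -- `isinstance(umot, list)` is always True under the type convention
  pp.map (fun umot => generer_masque_phonemes_A umot l_phon)

-- ===== PORT B =====
-- B's `_occurrences`: [s for s in range(len(toks)-len(pat)+1) if toks[s:s+len(pat)] == pat]
def pvOcc (toks : List String) (pat : List String) : List Int :=
  (PySem.List.pyRange 0 ((toks.length : Int) - (pat.length : Int) + 1) 1).filter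
    (fun s => PySem.List.slice toks (some s) (some (s + (pat.length : Int))) == pat)

-- one step of B's `for s in occurrences: if s >= end: mask[s:s+L] = [1]*L; end = s+L`.
-- The slice assignment is exact as take/replicate/drop: every s fed to it comes from
-- pvOcc, hence 0 ≤ s and s+L ≤ len(mask).
def pvPaint (L : Nat) (st : List Int × Int) (s : Int) : List Int × Int :=
  if st.2 ≤ s then
    (st.1.take s.toNat ++ List.replicate L (1 : Int) ++ st.1.drop ((s + (L : Int)).toNat), s + (L : Int))
  else st

def generer_masque_phonemes_B (phonemes : List (List String)) (l_phon : List String) : List Int :=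
  let toks := phonemes.map pvTok
  let mask := List.replicate toks.length (0 : Int)
  if l_phon.length = 0 then mask
  else ((pvOcc toks l_phon).foldl (pvPaint l_phon.length) (mask, 0)).1

def generer_masque_paragraphe_phonemes_alt (pp : List (List (List String))) (l_phon : List String) : List (List Int) :=
  pp.map (fun umot => generer_masque_phonemes_B umot l_phon)

-- ===== PRECONDITION & SPEC =====
-- Pre_ excludes exactly the inputs where the Python A raises IndexError: a word containing
-- an empty phoneme list (phonemes[i][0]), or a nonempty word together with l_phon = [] (l_phon[0]).
def Pre_generer_masque_paragraphe_phonemes (pp : List (List (List String))) (l_phon : List String) : Prop :=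
  ∀ umot ∈ pp, (∀ e ∈ umot, e ≠ []) ∧ (umot = [] ∨ l_phon ≠ [])
instance (pp : List (List (List String))) (l_phon : List String) : Decidable (Pre_generer_masque_paragraphe_phonemes pp l_phon) := by unfold Pre_generer_masque_paragraphe_phonemes; infer_instance

def pvWitness_generer_masque_paragraphe_phonemes : List (List (List String)) × List String :=
  ([[["a_b"], ["o"], ["a_c"], ["o"]], []], ["a", "o"])

def Spec_generer_masque_paragraphe_phonemes (pp : List (List (List String))) (l_phon : List String) (out : List (List Int)) : Prop := out = generer_masque_paragraphe_phonemes_alt pp l_phon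
instance (pp : List (List (List String))) (l_phon : List String) (out : List (List Int)) : Decidable (Spec_generer_masque_paragraphe_phonemes pp l_phon out) := by unfold Spec_generer_masque_paragraphe_phonemes; infer_instance

-- ===== CLAIM (what is proved, stated in full; the proofs are below) =====
def Claim_equal_generer_masque_paragraphe_phonemes : Prop := ∀ (pp : List (List (List String))) (l_phon : List String), Dom_generer_masque_paragraphe_phonemes pp l_phon → Pre_generer_masque_paragraphe_phonemes pp l_phon → Spec_generer_masque_paragraphe_phonemes pp l_phon (generer_masque_paragraphe_phonemes pp l_phon)

-- ===== LEMMAS AND PROOFS =====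

theorem pvTok_nil : pvTok [] = "" := by decide

theorem toks_getD (ph : List (List String)) (k : Nat) :
    (ph.map pvTok).getD k "" = pvTok (ph.getD k []) := by
  by_cases h : k < ph.length
  · simp [List.getD_eq_getElem?_getD, h]
  · have h1 : ph.length ≤ k := Nat.le_of_not_lt h
    simp [List.getD_eq_getElem?_getD, List.getElem?_eq_none_iff.mpr h1, pvTok_nil]

theorem isPrefixOf_cons_cons (a b : String) (s t : List String) :
    (a :: s).isPrefixOf (b :: t) = (a == b && s.isPrefixOf t) := by
  simp [List.isPrefixOf]

theorem pvInnerA_false (phonemes : List (List String)) (l_phon : List String) (fuel j k : Nat) :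
    pvInnerA phonemes l_phon fuel j k false = (false, j) := by
  cases fuel with
  | zero => rfl
  | succ fuel => rw [pvInnerA, if_neg]; simp

theorem pvInnerA_spec (phonemes : List (List String)) (l_phon : List String) (fuel j k : Nat)
    (hj : j ≤ l_phon.length) (hf : l_phon.length ≤ fuel + j) :
    ((pvInnerA phonemes l_phon fuel j k true).1 = true ∧
        (pvInnerA phonemes l_phon fuel j k true).2 = l_phon.length) ↔
      (l_phon.drop j).isPrefixOf ((phonemes.map pvTok).drop k) = true := by
  induction fuel generalizing j k with
  | zero =>
    have hj' : j = l_phon.length := by omega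
    subst hj'
    simp [pvInnerA, List.drop_length]
  | succ fuel ih =>
    rcases Nat.lt_or_ge j l_phon.length with hlt | hge
    · by_cases hk : k < phonemes.length
      · rw [pvInnerA, if_pos ⟨hk, rfl, hlt⟩]
        have hk' : k < (phonemes.map pvTok).length := by simpa using hk
        have htk : pvTok (PySem.List.pyGetD phonemes (k : Int) []) = (phonemes.map pvTok)[k] := by
          rw [PySem.List.pyGetD_natCast, ← toks_getD, List.getD_eq_getElem _ _ hk']
        have hlj : PySem.List.pyGetD l_phon (j : Int) "" = l_phon[j] := by
          rw [PySem.List.pyGetD_natCast, List.getD_eq_getElem _ _ hlt]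
        rw [List.drop_eq_getElem_cons hlt, List.drop_eq_getElem_cons hk', isPrefixOf_cons_cons]
        by_cases heq : (phonemes.map pvTok)[k] = l_phon[j]
        · rw [htk, hlj, heq]
          simp only [BEq.rfl, Bool.true_and]
          exact ih (j+1) (k+1) hlt (by omega)
        · rw [htk, hlj]
          have h4 : ((phonemes.map pvTok)[k] == l_phon[j]) = false :=
            beq_eq_false_iff_ne.mpr heq
          have h5 : (l_phon[j] == (phonemes.map pvTok)[k]) = false :=
            beq_eq_false_iff_ne.mpr (fun hc => heq hc.symm)
          rw [h4, h5, pvInnerA_false]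
          simp
      · rw [pvInnerA, if_neg (by tauto)]
        have h1 : (phonemes.map pvTok).drop k = [] :=
          List.drop_eq_nil_of_le (by simpa using Nat.le_of_not_lt hk)
        have h2 : l_phon.drop j ≠ [] := by
          intro hcon
          have := congrArg List.length hcon
          simp at this
          omega
        rw [h1]
        rcases List.exists_cons_of_ne_nil h2 with ⟨a, as, hcons⟩
        rw [hcons]
        simp only [List.isPrefixOf]
        constructor
        · rintro ⟨-, h3⟩; omega
        · intro h3; cases h3
    · have hj' : j = l_phon.length := Nat.le_antisymm hj hge
      subst hj'
      rw [pvInnerA, if_neg (by omega)]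
      simp [List.drop_length]

-- Nat-indexed occurrence list (proof-side image of pvOcc)
def pvOccN (toks pat : List String) : List Nat :=
  (List.range (toks.length + 1 - pat.length)).filter (fun s => pat.isPrefixOf (toks.drop s))

-- Nat-indexed paint step (proof-side image of pvPaint)
def pvPaintN (L : Nat) (st : List Int × Nat) (s : Nat) : List Int × Nat :=
  if st.2 ≤ s then
    (st.1.take s ++ List.replicate L (1 : Int) ++ st.1.drop (s + L), s + L)
  else st

theorem take_beq_prefix (xs pat : List String) :
    (xs.take pat.length == pat) = pat.isPrefixOf xs := by
  rw [Bool.eq_iff_iff, beq_iff_eq, List.isPrefixOf_iff_prefix, List.prefix_iff_eq_take, eq_comm]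

theorem pvOcc_eq (toks pat : List String) :
    pvOcc toks pat = (pvOccN toks pat).map Int.ofNat := by
  unfold pvOcc pvOccN
  rw [PySem.List.pyRange_one, List.filter_map]
  have hn : (((toks.length : Int) - (pat.length : Int) + 1) - 0).toNat = toks.length + 1 - pat.length := by omega
  rw [hn]
  congr 1
  · funext k
    simp only [zero_add, Int.ofNat_eq_natCast]
  congr 1
  funext k
  simp only [Function.comp, zero_add]
  rw [PySem.List.slice_natCast_add, take_beq_prefix]

theorem foldl_paint_natCast (L : Nat) (l : List Nat) (m : List Int) (e : Nat) :
    l.foldl (fun st s => pvPaint L st (Int.ofNat s)) (m, (e : Int)) =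
      (((l.foldl (pvPaintN L) (m, e)).1 : List Int), ((l.foldl (pvPaintN L) (m, e)).2 : Int)) := by
  induction l generalizing m e with
  | nil => rfl
  | cons a t ih =>
    simp only [List.foldl_cons]
    by_cases h : e ≤ a
    · have hstep : pvPaint L (m, (e:Int)) (Int.ofNat a) =
          ((pvPaintN L (m, e) a).1, ((pvPaintN L (m, e) a).2 : Int)) := by
        simp only [pvPaint, pvPaintN, Int.ofNat_eq_natCast]
        rw [if_pos (by exact_mod_cast h : (e:Int) ≤ (a:Int)), if_pos h]
        rw [show ((a:Int) + (L:Int)).toNat = a + L by omega,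
          show ((a:Int)).toNat = a by omega]
        congr 1
      rw [hstep]
      cases hh : pvPaintN L (m, e) a with
      | mk m' e' => simpa [hh] using ih m' e'
    · have hstep : pvPaint L (m, (e:Int)) (Int.ofNat a) = (m, (e:Int)) := by
        simp only [pvPaint, Int.ofNat_eq_natCast]
        rw [if_neg (by simpa using h)]
      have hstepN : pvPaintN L (m, e) a = (m, e) := by simp [pvPaintN, h]
      rw [hstep, hstepN]
      exact ih m e

theorem filter_ge_succ (l : List Nat) (hl : l.Pairwise (· < ·)) (i : Nat) :
    l.filter (fun s => i ≤ s) =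
      (if i ∈ l then [i] else []) ++ l.filter (fun s => i + 1 ≤ s) := by
  induction l with
  | nil => simp
  | cons a t ih =>
    have ht := hl.of_cons
    have ha : ∀ x ∈ t, a < x := fun x hx => (List.pairwise_cons.mp hl).1 x hx
    simp only [List.filter_cons, decide_eq_true_eq]
    rcases Nat.lt_trichotomy a i with h | h | h
    · rw [if_neg (show ¬ i ≤ a by omega), if_neg (show ¬ i + 1 ≤ a by omega), ih ht]
      have hm : (i ∈ a :: t) ↔ (i ∈ t) := by
        simp only [List.mem_cons]
        constructor
        · rintro (rfl | hm)
          · omega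
          · exact hm
        · exact Or.inr
      simp only [hm]
    · subst h
      rw [if_pos (le_refl a), if_neg (show ¬ a + 1 ≤ a by omega),
        if_pos List.mem_cons_self]
      have : t.filter (fun s => a ≤ s) = t.filter (fun s => a + 1 ≤ s) :=
        List.filter_congr (fun x hx => by have := ha x hx; simp; omega)
      rw [this]
      rfl
    · rw [if_pos (show i ≤ a by omega), if_pos (show i + 1 ≤ a by omega),
        if_neg (show i ∉ a :: t by
          simp only [List.mem_cons]
          rintro (rfl | hm)
          · omega
          · have := ha i hm; omega),
        List.nil_append, ih ht,
        if_neg (show i ∉ t by intro hm; have := ha i hm; omega), List.nil_append]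

theorem fold_between (L : Nat) (l : List Nat) (m : List Int) (e j : Nat) (hj : j ≤ e) :
    (l.filter (fun s => j ≤ s)).foldl (pvPaintN L) (m, e) =
      (l.filter (fun s => e ≤ s)).foldl (pvPaintN L) (m, e) := by
  induction l generalizing m e j with
  | nil => simp
  | cons a t ih =>
    simp only [List.filter_cons, decide_eq_true_eq]
    rcases Nat.lt_or_ge a j with h | h
    · rw [if_neg (show ¬ j ≤ a by omega), if_neg (show ¬ e ≤ a by omega)]
      exact ih m e j hj
    · rcases Nat.lt_or_ge a e with h2 | h2
      · rw [if_pos (show j ≤ a by omega), if_neg (show ¬ e ≤ a by omega)]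
        rw [List.foldl_cons, show pvPaintN L (m, e) a = (m, e) by simp [pvPaintN]; omega]
        exact ih m e j hj
      · rw [if_pos (show j ≤ a by omega), if_pos h2]
        rw [List.foldl_cons, List.foldl_cons,
          show pvPaintN L (m, e) a =
            (m.take a ++ List.replicate L (1 : Int) ++ m.drop (a + L), a + L) by
              simp [pvPaintN, h2]]
        exact (ih _ (a + L) j (by omega)).trans (ih _ (a + L) e (by omega)).symm

-- occurrence list is sorted and its members characterized
theorem pvOccN_pairwise (toks pat : List String) : (pvOccN toks pat).Pairwise (· < ·) :=
  List.pairwise_lt_range.filter _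

theorem mem_pvOccN (toks pat : List String) (s : Nat) :
    s ∈ pvOccN toks pat ↔ s < toks.length + 1 - pat.length ∧ pat.isPrefixOf (toks.drop s) = true := by
  simp [pvOccN, List.mem_filter, List.mem_range]

theorem main_fold (phonemes : List (List String)) (l_phon : List String) (hp : l_phon ≠ [])
    (fuel : Nat) : ∀ (i e : Nat) (m : List Int), e ≤ i → phonemes.length ≤ fuel + i →
    m.length = phonemes.length →
    m.drop i = List.replicate (phonemes.length - i) 0 →
    ((((pvOccN (phonemes.map pvTok) l_phon).filter (fun s => i ≤ s)).foldl
        (pvPaintN l_phon.length) (m, e)).1)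
      = m.take i ++ pvOuterA phonemes l_phon fuel i := by
  have hp0 : 0 < l_phon.length := List.length_pos_iff.mpr hp
  have hl : l_phon = l_phon[0] :: l_phon.drop 1 := by
    have h0 := List.drop_eq_getElem_cons hp0
    rwa [List.drop_zero] at h0
  induction fuel with
  | zero =>
    intro i e m he hfu hlen hdrop
    have hn : phonemes.length ≤ i := by omega
    have hfil : (pvOccN (phonemes.map pvTok) l_phon).filter (fun s => i ≤ s) = [] := by
      rw [List.filter_eq_nil_iff]
      intro s hs
      have := (mem_pvOccN _ _ s).mp hs
      simp only [List.length_map] at this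
      simp
      omega
    rw [hfil]
    simp only [List.foldl_nil]
    rw [pvOuterA, List.take_of_length_le (by omega), List.append_nil]
  | succ fuel ih =>
    intro i e m he hfu hlen hdrop
    by_cases hi : i < phonemes.length
    · have hk' : i < (phonemes.map pvTok).length := by simpa using hi
      have htk : pvTok (PySem.List.pyGetD phonemes (i : Int) []) = (phonemes.map pvTok)[i] := by
        rw [PySem.List.pyGetD_natCast, ← toks_getD, List.getD_eq_getElem _ _ hk']
      have hdc : (phonemes.map pvTok).drop i
          = (phonemes.map pvTok)[i] :: (phonemes.map pvTok).drop (i+1) :=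
        List.drop_eq_getElem_cons hk'
      -- the A-side branch pair is equivalent to a full prefix match at i
      have hbranch : ((pvTok (PySem.List.pyGetD phonemes (i : Int) []) ==
              PySem.List.pyGetD l_phon (0 : Int) "") = true ∧
            ((pvInnerA phonemes l_phon l_phon.length 1 (i+1) true).1 = true ∧
              (pvInnerA phonemes l_phon l_phon.length 1 (i+1) true).2 = l_phon.length)) ↔
          l_phon.isPrefixOf ((phonemes.map pvTok).drop i) = true := by
        rw [hdc]
        conv_rhs => rw [hl]
        rw [isPrefixOf_cons_cons]
        rw [pvInnerA_spec phonemes l_phon l_phon.length 1 (i+1) hp0 (by omega)]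
        rw [htk, PySem.List.pyGetD_zero, List.getD_eq_getElem _ _ hp0]
        constructor
        · rintro ⟨h1, h2⟩
          rw [Bool.and_eq_true, h2]
          exact ⟨by rw [beq_iff_eq]; exact (beq_iff_eq.mp h1).symm, rfl⟩
        · intro h
          rw [Bool.and_eq_true] at h
          exact ⟨by rw [beq_iff_eq]; exact (beq_iff_eq.mp h.1).symm, h.2⟩
      by_cases hm : l_phon.isPrefixOf ((phonemes.map pvTok).drop i) = true
      · -- match at i
        have hpref : l_phon <+: (phonemes.map pvTok).drop i := List.isPrefixOf_iff_prefix.mp hm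
        have hLle : i + l_phon.length ≤ phonemes.length := by
          have := hpref.length_le
          simp only [List.length_drop, List.length_map] at this
          omega
        have hmem : i ∈ pvOccN (phonemes.map pvTok) l_phon := by
          rw [mem_pvOccN]
          constructor
          · simp only [List.length_map]; omega
          · exact hm
        rw [filter_ge_succ _ (pvOccN_pairwise _ _) i, if_pos hmem, List.cons_append,
          List.nil_append, List.foldl_cons,
          show pvPaintN l_phon.length (m, e) i =
            (m.take i ++ List.replicate l_phon.length (1 : Int) ++ m.drop (i + l_phon.length),
              i + l_phon.length) by simp [pvPaintN, he],
          fold_between _ _ _ _ (i+1) (by omega)]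
        have h1 : (m.take i ++ List.replicate l_phon.length (1 : Int) ++
            m.drop (i + l_phon.length)).length = phonemes.length := by
          simp [hlen]; omega
        have hfl : (m.take i ++ List.replicate l_phon.length (1 : Int)).length
            = i + l_phon.length := by
          simp [hlen]
          omega
        have h2 : (m.take i ++ List.replicate l_phon.length (1 : Int) ++
            m.drop (i + l_phon.length)).drop (i + l_phon.length)
            = List.replicate (phonemes.length - (i + l_phon.length)) 0 := by
          rw [List.drop_left' hfl]
          have hdd : m.drop (i + l_phon.length) = (m.drop i).drop l_phon.length := by
            rw [List.drop_drop, Nat.add_comm]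
          rw [hdd, hdrop, List.drop_replicate]
          congr 1
          omega
        rw [ih (i + l_phon.length) (i + l_phon.length) _ (le_refl _) (by omega) h1 h2]
        -- branch of pvOuterA
        rw [pvOuterA, if_pos hi]
        have hA := hbranch.mpr hm
        rw [if_pos hA.1, if_pos hA.2]
        rw [List.take_left' hfl, List.append_assoc]
      · -- no match at i
        have hnmem : i ∉ pvOccN (phonemes.map pvTok) l_phon := by
          rw [mem_pvOccN]
          rintro ⟨-, hc⟩
          exact hm hc
        rw [filter_ge_succ _ (pvOccN_pairwise _ _) i, if_neg hnmem, List.nil_append]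
        have hdrop1 : m.drop (i+1) = List.replicate (phonemes.length - (i+1)) 0 := by
          have h1 : m.drop (i+1) = (m.drop i).drop 1 := by
            rw [List.drop_drop]
          rw [h1, hdrop, List.drop_replicate]
          congr 1
        rw [ih (i+1) e m (by omega) (by omega) hlen hdrop1]
        rw [pvOuterA, if_pos hi]
        have hmi : m[i]? = some 0 := by
          have : (m.drop i)[0]? = m[i]? := by
            rw [List.getElem?_drop]
            simp
          rw [← this, hdrop]
          rw [List.getElem?_replicate]
          simp
          omega
        have htake : m.take (i+1) = m.take i ++ [(0 : Int)] := by
          rw [List.take_add_one, hmi]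
          rfl
        by_cases hA1 : (pvTok (PySem.List.pyGetD phonemes (i : Int) []) ==
            PySem.List.pyGetD l_phon (0 : Int) "") = true
        · have hA2 : ¬ ((pvInnerA phonemes l_phon l_phon.length 1 (i+1) true).1 = true ∧
              (pvInnerA phonemes l_phon l_phon.length 1 (i+1) true).2 = l_phon.length) := by
            intro hc
            exact hm (hbranch.mp ⟨hA1, hc⟩)
          rw [if_pos hA1, if_neg hA2, htake]
          simp
        · rw [if_neg hA1, htake]
          simp
    · have hfil : (pvOccN (phonemes.map pvTok) l_phon).filter (fun s => i ≤ s) = [] := by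
        rw [List.filter_eq_nil_iff]
        intro s hs
        have := (mem_pvOccN _ _ s).mp hs
        simp only [List.length_map] at this
        simp
        omega
      rw [hfil]
      simp only [List.foldl_nil]
      rw [pvOuterA, if_neg hi, List.take_of_length_le (by omega), List.append_nil]

theorem word_eq (phonemes : List (List String)) (l_phon : List String)
    (h : phonemes = [] ∨ l_phon ≠ []) :
    generer_masque_phonemes_A phonemes l_phon = generer_masque_phonemes_B phonemes l_phon := by
  unfold generer_masque_phonemes_A generer_masque_phonemes_B
  by_cases hp : l_phon = []
  · rcases h with h | h
    · subst h hp; rfl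
    · exact absurd hp h
  · rw [if_neg (by simpa using hp)]
    rw [pvOcc_eq]
    have hcast : ∀ (l : List Nat) (st : List Int × Int),
        (l.map Int.ofNat).foldl (pvPaint l_phon.length) st =
          l.foldl (fun st s => pvPaint l_phon.length st (Int.ofNat s)) st := by
      intro l st
      rw [List.foldl_map]
    rw [hcast]
    have hb := foldl_paint_natCast l_phon.length (pvOccN (phonemes.map pvTok) l_phon)
      (List.replicate (phonemes.map pvTok).length (0 : Int)) 0
    norm_num at hb
    simp only [Int.ofNat_eq_natCast, List.length_map]
    rw [hb]
    have hfil : (pvOccN (phonemes.map pvTok) l_phon).filter (fun s => 0 ≤ s)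
        = pvOccN (phonemes.map pvTok) l_phon := List.filter_eq_self.mpr (by simp)
    have hmain := main_fold phonemes l_phon hp phonemes.length 0 0
      (List.replicate (phonemes.map pvTok).length (0 : Int)) (by omega)
      (by omega) (by simp) (by simp)
    rw [hfil] at hmain
    simp only [List.length_map, List.take_zero, List.nil_append] at hmain
    exact hmain.symm

-- ===== VERDICT (by name: the statement is the Claim_ definition above) =====
theorem generer_masque_paragraphe_phonemes_spec : Claim_equal_generer_masque_paragraphe_phonemes := by
  intro pp l_phon _ hpre
  unfold Spec_generer_masque_paragraphe_phonemes generer_masque_paragraphe_phonemes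
    generer_masque_paragraphe_phonemes_alt
  exact List.map_congr_left (fun umot hu => word_eq umot l_phon (hpre umot hu).2)
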